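-- pv_equiv track=rewrite | github.com/MrBrantCode/unitest_baseline | mut_generate/mist_train_taco/taco_1373/solution.py | de_nico
-- ===== SOURCE A (Python) =====
-- def de_nico(key, message):
--     # Calculate the length of the key
--     key_length = len(key)
--
--     # Create the numeric key by sorting the key and finding the index of each character
--     numeric_key = [sorted(key).index(c) for c in key]
--
--     # Initialize an empty string to store the decoded message
--     decoded_message = ''
--
--     # Process the message in chunks of length equal to the key length
--     while message:
--         # Extract the current chunk of the message
--         current_chunk = message[:key_length]
--
--         # Decode the current chunk using the numeric key
--         for index in numeric_key:
--             if index < len(current_chunk):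
--                 decoded_message += current_chunk[index]
--
--         # Move to the next chunk of the message
--         message = message[key_length:]
--
--     # Return the decoded message with trailing whitespace removed
--     return decoded_message.rstrip()
-- ===== SOURCE B (Python) =====
-- def de_nico(key, message):
--     # Rank of a key char = number of key chars strictly smaller than it (no sorting:
--     # for duplicates this equals the first index of the char in the sorted key).
--     # Column r of the chunk matrix is the strided slice message[r::k]; the output
--     # interleaves the columns selected by the key ranks, row by row.
--     k = len(key)
--     n = len(message)
--     cols = [message[sum(d < c for d in key)::k] for c in key] if k else []
--     rows = (n + k - 1) // k if k else 0
--     out = []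
--     for t in range(rows):
--         for col in cols:
--             if t < len(col):
--                 out.append(col[t])
--     return ''.join(out).rstrip()
-- ===== Notes on version B (the rewrite author's own statement) =====
-- stated objective: faster
-- what changed: B drops the sort entirely (a key char's rank is the count of strictly smaller key chars), splits the message once into strided column slices message[r::k], and interleaves the selected columns row by row, instead of A's per-character sorted(key).index scan and repeated slicing of the shrinking message.
-- outside the precondition, e.g. on de_nico('', 'x'): A does not finish within the time limit, B returns ''
import Mathlib
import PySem

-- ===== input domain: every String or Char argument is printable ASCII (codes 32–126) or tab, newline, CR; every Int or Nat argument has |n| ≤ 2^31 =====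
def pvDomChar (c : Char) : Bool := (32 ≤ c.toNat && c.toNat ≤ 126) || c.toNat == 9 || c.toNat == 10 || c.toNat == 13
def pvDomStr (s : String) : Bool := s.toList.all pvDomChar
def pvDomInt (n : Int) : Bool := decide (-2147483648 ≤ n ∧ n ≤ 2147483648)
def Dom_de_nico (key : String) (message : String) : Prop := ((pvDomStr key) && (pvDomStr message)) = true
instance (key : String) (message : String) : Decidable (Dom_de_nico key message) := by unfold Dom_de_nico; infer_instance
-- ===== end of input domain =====

-- B ranks each key character by counting the strictly smaller key characters (no sort at all),
-- splits the message into strided column slices message[r::k], and interleaves the selected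
-- columns row by row — instead of A's per-character sorted(key).index scan and repeated
-- chunk slicing of the message.

-- ===== PORT A =====
-- A's while-loop over the remaining message; when k = 0 and msg ≠ [] the Python loops forever
-- (excluded by Pre_), ported as returning acc there.
def deNicoLoopA (nk : List Nat) (k : Nat) (msg : List Char) (acc : List Char) : List Char :=
  if msg = [] then acc
  else if k = 0 then acc
  else
    deNicoLoopA nk k (msg.drop k)
      (nk.foldl (fun a i => if i < (msg.take k).length then a ++ [(msg.take k).getD i ' '] else a) acc)
termination_by msg.length
decreasing_by
  simp [List.length_drop]
  rename_i h1 h2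
  have : 0 < msg.length := List.length_pos_iff.mpr h1
  omega

-- sorted(key).index(c): index? is always some here since c ∈ key; Python never raises
def deNicoNumericA (kl : List Char) : List Nat :=
  kl.map (fun c => (PySem.List.index? (PySem.List.sorted kl (fun c => c) false) c).getD 0)

def de_nico (key : String) (message : String) : String :=
  String.ofList (PySem.Chars.rstrip
    (deNicoLoopA (deNicoNumericA key.toList) key.toList.length message.toList []))

-- ===== PORT B =====
-- Python's strided slice message[a::k] for k > 0: the characters at a, a+k, a+2k, …
-- (exact by hand; the k = 0 guard is unreachable — B only slices with k = len(key) > 0).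
def deNicoColB (ml : List Char) (a k : Nat) : List Char :=
  if k = 0 then []
  else if a < ml.length then ml.getD a ' ' :: deNicoColB ml (a + k) k else []
termination_by ml.length - a
decreasing_by rename_i h1 h2; omega

-- sum(d < c for d in key) is the count of key chars below c
def deNicoColsB (kl ml : List Char) (k : Nat) : List (List Char) :=
  if k = 0 then []
  else kl.map (fun c => deNicoColB ml (kl.countP (fun d => d < c)) k)

-- B's for-loop over the row indices t in range(rows)
def deNicoLoopB (cols : List (List Char)) (rows t : Nat) (acc : List Char) : List Char :=
  if t < rows then
    deNicoLoopB cols rows (t + 1)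
      (cols.foldl (fun a col => if t < col.length then a ++ [col.getD t ' '] else a) acc)
  else acc
termination_by rows - t
decreasing_by omega

def de_nico_alt (key : String) (message : String) : String :=
  String.ofList (PySem.Chars.rstrip
    (deNicoLoopB (deNicoColsB key.toList message.toList key.toList.length)
      (if key.toList.length = 0 then 0
       else (message.toList.length + key.toList.length - 1) / key.toList.length) 0 []))

-- ===== PRECONDITION & SPEC =====
-- Pre_ excludes key = "" with a nonempty message: there Python A loops forever (the slice
-- message[0:] never shrinks), so A returns on no such input (B returns "" there).
def Pre_de_nico (key : String) (message : String) : Prop := key ≠ "" ∨ message = ""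
instance (key : String) (message : String) : Decidable (Pre_de_nico key message) := by
  unfold Pre_de_nico; infer_instance
def pvWitness_de_nico : String × String := ("ba", "abcde")
def Spec_de_nico (key : String) (message : String) (out : String) : Prop := out = de_nico_alt key message
instance (key : String) (message : String) (out : String) : Decidable (Spec_de_nico key message out) := by unfold Spec_de_nico; infer_instance

-- ===== CLAIM (what is proved, stated in full; the proofs are below) =====
def Claim_equal_de_nico : Prop := ∀ (key : String) (message : String), Dom_de_nico key message → Pre_de_nico key message → Spec_de_nico key message (de_nico key message)

-- ===== LEMMAS AND PROOFS =====

-- in a sorted list the first index of a member c is the number of elements below c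
lemma sorted_index_countP (s : List Char) (hp : s.Pairwise (· ≤ ·)) (c : Char) (hc : c ∈ s) :
    PySem.List.index? s c = some (s.countP (fun d => decide (d < c))) := by
  induction s with
  | nil => cases hc
  | cons x xs ih =>
      rcases List.pairwise_cons.mp hp with ⟨hx, hxs⟩
      by_cases hxc : x = c
      · subst hxc
        have h0 : xs.countP (fun d => decide (d < x)) = 0 := by
          rw [List.countP_eq_zero]
          intro d hd
          simpa using not_lt_of_ge (hx d hd)
        rw [PySem.List.index?_cons_self]
        simp [h0]
      · have hcxs : c ∈ xs := by
          rcases List.mem_cons.mp hc with h | h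
          · exact absurd h.symm hxc
          · exact h
        have hlt : x < c := lt_of_le_of_ne (hx c hcxs) hxc
        rw [PySem.List.index?_cons_of_ne xs hxc, ih hxs hcxs]
        simp [hlt]

-- A's numeric-key entry for c equals B's comparison count of key chars below c
lemma rank_eq (kl : List Char) (c : Char) (hc : c ∈ kl) :
    ((PySem.List.index? (PySem.List.sorted kl (fun c => c) false) c).getD 0)
      = kl.countP (fun d => decide (d < c)) := by
  have hmem : c ∈ PySem.List.sorted kl (fun c => c) false := (PySem.List.mem_sorted _ _ _ _).mpr hc
  have hp : (PySem.List.sorted kl (fun c => c) false).Pairwise (· ≤ ·) := by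
    simpa using PySem.List.sorted_pairwise kl (fun c => c)
  rw [sorted_index_countP _ hp c hmem]
  simp [(PySem.List.sorted_perm kl (fun c => c) false).countP_eq]

-- ranks are < k for members of the key
lemma rank_lt (kl : List Char) (c : Char) (hc : c ∈ kl) :
    kl.countP (fun d => decide (d < c)) < kl.length := by
  rcases Nat.lt_or_ge (kl.countP (fun d => decide (d < c))) kl.length with h | h
  · exact h
  · exfalso
    have heq : kl.countP (fun d => decide (d < c)) = kl.length :=
      le_antisymm List.countP_le_length h
    have := (List.countP_eq_length).mp heq c hc
    simp at this

-- the strided column: membership and lookup at row t read message[a + t*k]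
lemma colB_spec (ml : List Char) (k : Nat) (hk : k ≠ 0) :
    ∀ m a, ml.length - a ≤ m → ∀ t : Nat,
      (t < (deNicoColB ml a k).length ↔ a + t * k < ml.length) ∧
      (deNicoColB ml a k).getD t ' ' = ml.getD (a + t * k) ' ' := by
  intro m
  induction m with
  | zero =>
      intro a hm t
      have hge : ml.length ≤ a := by omega
      rw [deNicoColB, if_neg hk, if_neg (by omega)]
      constructor
      · constructor
        · intro h; simp at h
        · intro h; omega
      · rw [List.getD_eq_getElem?_getD, List.getD_eq_getElem?_getD]
        rw [List.getElem?_eq_none (by simp),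
            List.getElem?_eq_none (le_trans hge (Nat.le_add_right _ _))]
  | succ m ih =>
      intro a hm t
      by_cases ha : a < ml.length
      · rw [deNicoColB, if_neg hk, if_pos ha]
        cases t with
        | zero =>
            constructor
            · simpa using ha
            · simp
        | succ t =>
            have hrec := ih (a + k) (by omega) t
            constructor
            · rw [List.length_cons]
              have : a + k + t * k = a + (t + 1) * k := by ring
              rw [← this]
              constructor
              · intro h; exact hrec.1.mp (by omega)
              · intro h; have := hrec.1.mpr h; omega
            · have : a + k + t * k = a + (t + 1) * k := by ring
              rw [List.getD_cons_succ, hrec.2, this]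
      · have hge : ml.length ≤ a := by omega
        rw [deNicoColB, if_neg hk, if_neg ha]
        constructor
        · constructor
          · intro h; simp at h
          · intro h; omega
        · rw [List.getD_eq_getElem?_getD, List.getD_eq_getElem?_getD]
          rw [List.getElem?_eq_none (by simp),
              List.getElem?_eq_none (le_trans hge (Nat.le_add_right _ _))]

-- A's chunked while-loop equals B's row loop over the strided columns
lemma loop_eq (ml : List Char) (k : Nat) (hk : k ≠ 0) (nk : List Nat) (hb : ∀ i ∈ nk, i < k) :
    ∀ m t acc, ml.length - t * k ≤ m →
      deNicoLoopA nk k (ml.drop (t * k)) acc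
        = deNicoLoopB (nk.map (fun i => deNicoColB ml i k)) ((ml.length + k - 1) / k) t acc := by
  have hk1 : 1 ≤ k := Nat.pos_of_ne_zero hk
  have hrows : ∀ t : Nat, t < (ml.length + k - 1) / k ↔ t * k < ml.length := by
    intro t
    have h1 : t + 1 ≤ (ml.length + k - 1) / k ↔ (t + 1) * k ≤ ml.length + k - 1 :=
      Nat.le_div_iff_mul_le hk1
    rw [Nat.succ_mul] at h1
    omega
  intro m
  induction m with
  | zero =>
      intro t acc hm
      have hge : ml.length ≤ t * k := by omega
      rw [deNicoLoopA, deNicoLoopB]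
      rw [if_pos (List.drop_eq_nil_of_le hge), if_neg (by rw [hrows]; omega)]
  | succ m ih =>
      intro t acc hm
      by_cases hlt : t * k < ml.length
      · have hne : ml.drop (t * k) ≠ [] := by
          have hlen : (List.drop (t * k) ml).length ≠ 0 := by simp [List.length_drop]; omega
          exact fun h => hlen (by simp [h])
        rw [deNicoLoopA, deNicoLoopB]
        rw [if_neg hne, if_neg hk, if_pos ((hrows t).mpr hlt)]
        rw [List.drop_drop, List.foldl_map]
        have hstep : List.foldl (fun a i =>
              if i < (List.take k (List.drop (t * k) ml)).length then
                a ++ [(List.take k (List.drop (t * k) ml)).getD i ' '] else a) acc nk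
            = List.foldl (fun a i =>
              if t < (deNicoColB ml i k).length then
                a ++ [(deNicoColB ml i k).getD t ' '] else a) acc nk := by
          apply PySem.List.foldl_congr_mem
          intro a i hi
          have hik : i < k := hb i hi
          obtain ⟨hmemb, hgetb⟩ := colB_spec ml k hk ml.length i (by omega) t
          have hclen : ((ml.drop (t * k)).take k).length = min k (ml.length - t * k) := by
            simp [List.length_take, List.length_drop]
          by_cases hin : i + t * k < ml.length
          · have hel : (List.take k (List.drop (t * k) ml)).getD i ' '
                = ml.getD (i + t * k) ' ' := by
              rw [List.getD_eq_getElem _ _ (by rw [hclen]; exact lt_min hik (by omega)),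
                  List.getD_eq_getElem _ _ (by omega : i + t * k < ml.length)]
              rw [List.getElem_take, List.getElem_drop]
              congr 1
              omega
            rw [if_pos (by rw [hclen]; exact lt_min hik (by omega)),
                if_pos (hmemb.mpr hin), hgetb, hel]
          · rw [if_neg (by
                  rw [hclen]; intro h
                  exact hin (by have := lt_of_lt_of_le h (min_le_right _ _); omega)),
                if_neg (fun h => hin (hmemb.mp h))]
        rw [hstep]
        have := ih (t + 1) (List.foldl (fun a i =>
              if t < (deNicoColB ml i k).length then
                a ++ [(deNicoColB ml i k).getD t ' '] else a) acc nk)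
          (by have hsm : (t + 1) * k = t * k + k := by ring
              omega)
        rw [← this]
        congr 1
        · rw [Nat.succ_mul]
      · rw [deNicoLoopA, deNicoLoopB]
        rw [if_pos (List.drop_eq_nil_of_le (by omega)), if_neg (by rw [hrows]; omega)]

-- ===== VERDICT (by name: the statement is the Claim_ definition above) =====
theorem de_nico_spec : Claim_equal_de_nico := by
  intro key message _hdom hpre
  unfold Spec_de_nico de_nico de_nico_alt
  by_cases hkey : key.toList = []
  · have hmsg : message.toList = [] := by
      rcases hpre with h | h
      · exact absurd (String.toList_eq_nil_iff.mp hkey) h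
      · rw [h]; rfl
    rw [deNicoLoopA, deNicoLoopB]
    simp [hkey, hmsg]
  · have hk : key.toList.length ≠ 0 := by
      intro h; exact hkey (List.eq_nil_of_length_eq_zero h)
    refine congrArg String.ofList (congrArg PySem.Chars.rstrip ?_)
    have hcols : deNicoColsB key.toList message.toList key.toList.length
        = (deNicoNumericA key.toList).map (fun i => deNicoColB message.toList i key.toList.length) := by
      unfold deNicoColsB deNicoNumericA
      rw [if_neg hk, List.map_map]
      apply List.map_congr_left
      intro c hc
      simp only [Function.comp]
      rw [rank_eq key.toList c hc]
    rw [hcols, if_neg hk]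
    have hb : ∀ i ∈ deNicoNumericA key.toList, i < key.toList.length := by
      intro i hi
      obtain ⟨c, hc, rfl⟩ := List.mem_map.mp hi
      rw [rank_eq key.toList c hc]
      exact rank_lt key.toList c hc
    have := loop_eq message.toList key.toList.length hk (deNicoNumericA key.toList) hb
      message.toList.length 0 [] (by omega)
    simpa using this
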